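-- pv_equiv track=rewrite | github.com/tapangoyal111/Assignments | os/Ass8/Hill Cipher/hc.py | hill_cipher_decrypt
-- ===== SOURCE A (Python) =====
-- def matrix_mult(a,b,mod):
-- 	res = [[0 for i in range(len(b[0]))] for j in range(len(a))]
-- 	for i in range(len(res)):
-- 		for j in range(len(res[0])):
-- 			for k in range(len(a[0])):
-- 				res[i][j] += a[i][k]*b[k][j]
-- 			res[i][j] = res[i][j]%mod
-- 	return(res)
--
-- def hill_cipher_decrypt(decrypt_mat,cipher_text):
-- 	# length of decryption matrix
-- 	n = len(decrypt_mat)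
-- 	#length of cipher text
-- 	n1 = len(cipher_text)
--
-- 	# get cipher text matrix form cipher text
-- 	p = [[0 for i in range(n1//n)] for j in range(n)]
-- 	ct=0
-- 	for i in range(n1//n):
-- 		for j in range(n):
-- 			temp = ord(cipher_text[ct])
-- 			if(temp<97):
-- 				p[j][i] = ord(cipher_text[ct])-48+26
-- 			else:
-- 				p[j][i] = ord(cipher_text[ct])-97
-- 			ct+=1
--
-- 	# get plain text matrix
-- 	plain_mat = matrix_mult(decrypt_mat,p,36)
--
-- 	# get plain text from plain text matrix
-- 	plaintext= ''
-- 	for i in range(len(plain_mat[0])):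
-- 		for j in range(len(plain_mat)):
-- 			if(plain_mat[j][i]>25):
-- 				plaintext += chr(int(round(plain_mat[j][i]))+48-26)
-- 			else:
-- 				plaintext += chr(int(round(plain_mat[j][i]))+97)
--
-- 	return(plaintext)
-- ===== SOURCE B (Python) =====
-- def hill_cipher_decrypt(decrypt_mat, cipher_text):
--     # Block-by-block fusion: decode a block, multiply by each matrix row, encode —
--     # no intermediate cipher/plain matrices are built.
--     n = len(decrypt_mat)
--     m = len(decrypt_mat[0])
--     out = []
--     for i in range(len(cipher_text) // n):
--         block = cipher_text[i * n:(i + 1) * n]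
--         v = [(ord(c) - 48 + 26) if ord(c) < 97 else (ord(c) - 97) for c in block]
--         for row in decrypt_mat:
--             val = sum(row[k] * v[k] for k in range(m)) % 36
--             out.append(chr(val + 48 - 26) if val > 25 else chr(val + 97))
--     return ''.join(out)
-- ===== Notes on version B (the rewrite author's own statement) =====
-- stated objective: simpler
-- what changed: Replaces the build-cipher-matrix / matrix_mult / read-out-plain-matrix pipeline by a single block-by-block pass that decodes each n-character block into a vector, multiplies it by each matrix row mod 36 and encodes immediately, so no intermediate matrices exist.
import Mathlib
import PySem

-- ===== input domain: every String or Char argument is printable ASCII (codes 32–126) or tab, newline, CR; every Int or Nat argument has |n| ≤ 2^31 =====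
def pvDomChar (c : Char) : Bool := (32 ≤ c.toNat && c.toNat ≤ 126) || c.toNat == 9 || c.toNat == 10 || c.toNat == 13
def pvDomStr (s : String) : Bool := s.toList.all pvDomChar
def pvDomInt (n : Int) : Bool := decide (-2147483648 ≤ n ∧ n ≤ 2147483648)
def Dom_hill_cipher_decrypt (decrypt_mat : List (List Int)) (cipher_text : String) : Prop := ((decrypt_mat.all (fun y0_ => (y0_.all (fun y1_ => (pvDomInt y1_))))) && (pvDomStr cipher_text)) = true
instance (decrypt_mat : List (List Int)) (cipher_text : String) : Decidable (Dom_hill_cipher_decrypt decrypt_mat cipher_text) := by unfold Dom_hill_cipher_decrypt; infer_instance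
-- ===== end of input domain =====

-- B replaces A's build-matrix / matrix_mult / read-out pipeline by one block-by-block
-- pass (decode block, multiply by each row mod 36, encode immediately); objective: simpler.

-- ===== PORT A =====
-- Literal port of matrix_mult: res starts as a zero matrix; list indexing is ported with
-- getD (default 0 / []) — exact wherever Python does not raise an IndexError (Pre_ below
-- excludes the raising inputs).  `ord`/`chr` are Char.toNat / Char.ofNat (exact on ASCII);
-- int(round(x)) of an int is x.
def matrix_mult (a b : List (List Int)) (mod : Int) : List (List Int) :=
  let res0 : List (List Int) :=
    List.replicate a.length (List.replicate (b.headD []).length 0)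
  (List.range res0.length).foldl (fun res i =>
    (List.range (res.headD []).length).foldl (fun res j =>
      let e :=
        (List.range (a.headD []).length).foldl
          (fun acc k => acc + (a.getD i []).getD k 0 * (b.getD k []).getD j 0)
          ((res.getD i []).getD j 0)
      res.set i ((res.getD i []).set j (PySem.Int.mod e mod))) res) res0

def hill_cipher_decrypt (decrypt_mat : List (List Int)) (cipher_text : String) : String :=
  let n := decrypt_mat.length
  let cs := cipher_text.toList
  let n1 := cs.length
  -- n1 // n : Nat division; Python raises ZeroDivisionError at n = 0 (excluded by Pre_)
  let nb := n1 / n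
  let p0 : List (List Int) := List.replicate n (List.replicate nb 0)
  let pr : List (List Int) × Nat :=
    (List.range nb).foldl (fun st i =>
      (List.range n).foldl (fun st j =>
        let temp : Int := (cs.getD st.2 ' ').toNat
        let v : Int := if temp < 97 then temp - 48 + 26 else temp - 97
        (st.1.set j ((st.1.getD j []).set i v), st.2 + 1)) st) (p0, 0)
  let plain_mat := matrix_mult decrypt_mat pr.1 36
  let plaintext : List Char :=
    (List.range (plain_mat.headD []).length).foldl (fun s i =>
      (List.range plain_mat.length).foldl (fun s j =>
        let x := (plain_mat.getD j []).getD i 0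
        if x > 25 then s ++ [Char.ofNat (x + 48 - 26).toNat]
        else s ++ [Char.ofNat (x + 97).toNat]) s) []
  String.mk plaintext

-- ===== PORT B =====
def decode_char (c : Char) : Int :=
  let t : Int := c.toNat
  if t < 97 then t - 48 + 26 else t - 97

def encode_val (v : Int) : Char :=
  if v > 25 then Char.ofNat (v + 48 - 26).toNat else Char.ofNat (v + 97).toNat

-- Literal port of Source B: the slice cipher_text[i*n:(i+1)*n] (non-negative in-range bounds)
-- is (cs.drop (i*n)).take n; ''.join of the char list is String.mk.
def hill_cipher_decrypt_alt (decrypt_mat : List (List Int)) (cipher_text : String) : String :=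
  let n := decrypt_mat.length
  let m := (decrypt_mat.headD []).length
  let cs := cipher_text.toList
  let out : List Char :=
    (List.range (cs.length / n)).foldl (fun out i =>
      let v := ((cs.drop (i * n)).take n).map decode_char
      decrypt_mat.foldl (fun out row =>
        let val := PySem.Int.mod
          ((List.range m).foldl (fun acc k => acc + row.getD k 0 * v.getD k 0) 0) 36
        out ++ [encode_val val]) out) []
  String.mk out

-- ===== PRECONDITION & SPEC =====
-- Pre_ excludes exactly the inputs where Python A raises: an empty matrix
-- (ZeroDivisionError on n1//n), and — when at least one block is processed —
-- a first row longer than the matrix height or longer than some other row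
-- (IndexError inside matrix_mult).
def Pre_hill_cipher_decrypt (decrypt_mat : List (List Int)) (cipher_text : String) : Prop :=
  decrypt_mat ≠ [] ∧
    (cipher_text.toList.length < decrypt_mat.length ∨
      ((decrypt_mat.headD []).length ≤ decrypt_mat.length ∧
        ∀ row ∈ decrypt_mat, (decrypt_mat.headD []).length ≤ row.length))

instance (decrypt_mat : List (List Int)) (cipher_text : String) : Decidable (Pre_hill_cipher_decrypt decrypt_mat cipher_text) := by unfold Pre_hill_cipher_decrypt; infer_instance

def pvWitness_hill_cipher_decrypt : List (List Int) × String := ([[25, 17], [4, 15]], "code")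

def Spec_hill_cipher_decrypt (decrypt_mat : List (List Int)) (cipher_text : String) (out : String) : Prop := out = hill_cipher_decrypt_alt decrypt_mat cipher_text
instance (decrypt_mat : List (List Int)) (cipher_text : String) (out : String) : Decidable (Spec_hill_cipher_decrypt decrypt_mat cipher_text out) := by unfold Spec_hill_cipher_decrypt; infer_instance

-- ===== CLAIM (what is proved, stated in full; the proofs are below) =====
def Claim_equal_hill_cipher_decrypt : Prop := ∀ (decrypt_mat : List (List Int)) (cipher_text : String), Dom_hill_cipher_decrypt decrypt_mat cipher_text → Pre_hill_cipher_decrypt decrypt_mat cipher_text → Spec_hill_cipher_decrypt decrypt_mat cipher_text (hill_cipher_decrypt decrypt_mat cipher_text)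

-- ===== LEMMAS AND PROOFS =====

theorem set_map_range {α : Type} (L t : ℕ) (g : ℕ → α) (x : α) :
    ((List.range L).map g).set t x = (List.range L).map (fun i => if i = t then x else g i) := by
  apply List.ext_getElem
  · simp
  · intro i h1 h2
    simp only [List.length_set, List.length_map, List.length_range] at h1
    by_cases hit : i = t
    · subst hit
      simp
    · simp [hit, Ne.symm hit]

theorem getD_map_range {α : Type} (L t : ℕ) (g : ℕ → α) (d : α) (h : t < L) :
    ((List.range L).map g).getD t d = g t := by
  simp [List.getD_eq_getElem?_getD, h]

theorem getD_map_range_ge {α : Type} (L t : ℕ) (g : ℕ → α) (d : α) (h : L ≤ t) :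
    ((List.range L).map g).getD t d = d := by
  rw [List.getD_eq_getElem?_getD, List.getElem?_map, List.getElem?_eq_none (by simpa using h)]
  rfl

theorem headD_map_range {α : Type} (L : ℕ) (g : ℕ → α) (d : α) (h : 0 < L) :
    ((List.range L).map g).headD d = g 0 := by
  cases L with
  | zero => omega
  | succ k => simp [List.range_succ_eq_map]

theorem fold_set_range_map {α : Type} (d : α) (G : ℕ → α) (F : ℕ → α → α) (L : ℕ) :
    ∀ (k : ℕ), k ≤ L →
      (List.range k).foldl (fun r j => r.set j (F j (r.getD j d))) ((List.range L).map G)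
        = (List.range L).map (fun j => if j < k then F j (G j) else G j) := by
  intro k
  induction k with
  | zero => intro _; simp
  | succ k ih =>
    intro hk
    rw [List.range_succ, List.foldl_append, ih (by omega)]
    simp only [List.foldl_cons, List.foldl_nil]
    rw [getD_map_range L k _ d (by omega), if_neg (by omega), set_map_range]
    apply List.map_congr_left
    intro j hj
    by_cases h1 : j = k
    · subst h1; simp
    · by_cases h2 : j < k <;> simp [h1, h2] <;> omega

theorem fold_set_row {α : Type} (d : α) (g : ℕ → α → α) (i : ℕ) :
    ∀ (l : List ℕ) (res : List α), i < res.length →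
      l.foldl (fun res j => res.set i (g j (res.getD i d))) res
        = res.set i (l.foldl (fun row j => g j row) (res.getD i d)) := by
  intro l
  induction l with
  | nil =>
    intro res h
    rw [List.foldl_nil, List.getD_eq_getElem?_getD, List.getElem?_eq_getElem h]
    simp
  | cons x t ih =>
    intro res h
    rw [List.foldl_cons, ih _ (by simpa using h), List.foldl_cons]
    rw [List.set_set, List.getD_eq_getElem?_getD, List.getElem?_set_self (by omega), List.getD_eq_getElem?_getD]
    simp [List.getElem?_eq_getElem h]

theorem foldl_index {α β : Type} (d : α) (g : β → α → β) :
    ∀ (l : List α) (init : β),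
      l.foldl g init = (List.range l.length).foldl (fun acc j => g acc (l.getD j d)) init := by
  intro l
  induction l with
  | nil => intro init; simp
  | cons x t ih =>
    intro init
    simp only [List.foldl_cons, List.length_cons, List.range_succ_eq_map, List.foldl_map, List.getD_cons_zero, List.getD_cons_succ]
    exact ih (g init x)

theorem pair_ct (cs : List Char) (i : ℕ) (N : ℕ) (p : List (List Int)) (c0 : ℕ) :
    (List.range N).foldl (fun st j =>
        let temp : Int := (cs.getD st.2 ' ').toNat
        let v : Int := if temp < 97 then temp - 48 + 26 else temp - 97
        (st.1.set j ((st.1.getD j []).set i v), st.2 + 1)) (p, c0)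
      = ((List.range N).foldl
          (fun p j => p.set j ((p.getD j []).set i (decode_char (cs.getD (c0 + j) ' ')))) p,
         c0 + N) := by
  induction N with
  | zero => simp
  | succ N ih =>
    rw [List.range_succ, List.foldl_append, List.foldl_append, ih]
    simp only [List.foldl_cons, List.foldl_nil, decode_char]
    rfl

theorem p_closed (cs : List Char) (n nb : ℕ) (t : ℕ) :
    (List.range t).foldl (fun st i =>
        (List.range n).foldl (fun st j =>
          let temp : Int := (cs.getD st.2 ' ').toNat
          let v : Int := if temp < 97 then temp - 48 + 26 else temp - 97
          (st.1.set j ((st.1.getD j []).set i v), st.2 + 1)) st)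
      (List.replicate n (List.replicate nb (0 : Int)), 0)
    = ((List.range n).map (fun j => (List.range nb).map (fun i =>
        if i < t then decode_char (cs.getD (i * n + j) ' ') else 0)), t * n) := by
  induction t with
  | zero =>
    simp only [List.range_zero, List.foldl_nil, Nat.not_lt_zero, if_false, Nat.zero_mul]
    rw [show (fun (j : ℕ) => (List.range nb).map (fun (i : ℕ) => (0 : Int))) = fun _ => List.replicate nb (0 : Int) from funext (fun j => by simp [List.map_const'])]
    simp [List.map_const']
  | succ t ih =>
    rw [List.range_succ, List.foldl_append, ih]
    simp only [List.foldl_cons, List.foldl_nil]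
    rw [pair_ct]
    rw [fold_set_range_map ([] : List Int)
        (fun j => (List.range nb).map (fun i => if i < t then decode_char (cs.getD (i * n + j) ' ') else 0))
        (fun j row => row.set t (decode_char (cs.getD (t * n + j) ' ')))
        n n le_rfl]
    refine Prod.ext ?_ (by simp [Nat.succ_mul])
    apply List.map_congr_left
    intro j hj
    rw [if_pos (List.mem_range.mp hj), set_map_range]
    apply List.map_congr_left
    intro i hi
    by_cases h1 : i = t
    · subst h1; simp
    · rw [if_neg h1]
      by_cases h2 : i < t
      · rw [if_pos h2, if_pos (by omega)]
      · rw [if_neg h2, if_neg (by omega)]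

theorem matrix_mult_aux (a b : List (List Int)) (mod : Int) :
    ∀ (k : ℕ), k ≤ a.length →
      (List.range k).foldl (fun res i =>
          (List.range (res.headD []).length).foldl (fun res j =>
            res.set i ((res.getD i []).set j (PySem.Int.mod
              ((List.range (a.headD []).length).foldl
                (fun acc k' => acc + (a.getD i []).getD k' 0 * (b.getD k' []).getD j 0)
                ((res.getD i []).getD j 0)) mod))) res)
        (List.replicate a.length (List.replicate (b.headD []).length (0 : Int)))
      = (List.range a.length).map (fun i =>
          if i < k then
            (List.range (b.headD []).length).map (fun j => PySem.Int.mod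
              ((List.range (a.headD []).length).foldl
                (fun acc k' => acc + (a.getD i []).getD k' 0 * (b.getD k' []).getD j 0) 0) mod)
          else List.replicate (b.headD []).length 0) := by
  intro k
  induction k with
  | zero =>
    intro _
    simp only [List.range_zero, List.foldl_nil, Nat.not_lt_zero, if_false]
    simp [List.map_const']
  | succ k ih =>
    intro hk
    rw [List.range_succ, List.foldl_append, ih (by omega)]
    simp only [List.foldl_cons, List.foldl_nil]
    have hhead : ((((List.range a.length).map (fun i =>
        if i < k then
          (List.range (b.headD []).length).map (fun j => PySem.Int.mod
            ((List.range (a.headD []).length).foldl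
              (fun acc k' => acc + (a.getD i []).getD k' 0 * (b.getD k' []).getD j 0) 0) mod)
        else List.replicate (b.headD []).length 0))).headD []).length
        = (b.headD []).length := by
      rw [headD_map_range _ _ _ (by omega)]
      by_cases h0 : 0 < k <;> simp [h0]
    rw [hhead]
    rw [fold_set_row ([] : List Int)
        (fun j row => row.set j (PySem.Int.mod
          ((List.range (a.headD []).length).foldl
            (fun acc k' => acc + (a.getD k []).getD k' 0 * (b.getD k' []).getD j 0)
            (row.getD j 0)) mod)) k _ _
        (by simp; omega)]
    rw [getD_map_range _ _ _ _ (by omega), if_neg (by omega)]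
    rw [show List.replicate (b.headD []).length (0 : Int) = (List.range (b.headD []).length).map (fun _ => (0 : Int)) by simp [List.map_const']]
    rw [fold_set_range_map (0 : Int) (fun _ => (0 : Int))
        (fun j x => PySem.Int.mod
          ((List.range (a.headD []).length).foldl
            (fun acc k' => acc + (a.getD k []).getD k' 0 * (b.getD k' []).getD j 0) x) mod)
        (b.headD []).length (b.headD []).length le_rfl]
    rw [set_map_range]
    apply List.map_congr_left
    intro i hi
    by_cases h1 : i = k
    · subst h1
      rw [if_pos rfl, if_pos (by omega)]
      apply List.map_congr_left
      intro j hj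
      rw [if_pos (List.mem_range.mp hj)]
    · rw [if_neg h1]
      by_cases h2 : i < k
      · rw [if_pos h2, if_pos (by omega)]
      · rw [if_neg h2, if_neg (by omega)]

theorem matrix_mult_closed (a b : List (List Int)) (mod : Int) :
    matrix_mult a b mod = (List.range a.length).map (fun i =>
      (List.range (b.headD []).length).map (fun j => PySem.Int.mod
        ((List.range (a.headD []).length).foldl
          (fun acc k' => acc + (a.getD i []).getD k' 0 * (b.getD k' []).getD j 0) 0) mod)) := by
  unfold matrix_mult
  simp only [List.length_replicate]
  rw [matrix_mult_aux a b mod a.length le_rfl]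
  apply List.map_congr_left
  intro i hi
  rw [if_pos (List.mem_range.mp hi)]

theorem ports_eq_pos (dm : List (List Int)) (ct : String) (hn : 0 < dm.length) :
    hill_cipher_decrypt dm ct = hill_cipher_decrypt_alt dm ct := by
  simp only [hill_cipher_decrypt, hill_cipher_decrypt_alt]
  rw [p_closed]
  have hPclean : (List.map (fun j => List.map (fun i =>
        if i < ct.toList.length / dm.length then decode_char (ct.toList.getD (i * dm.length + j) ' ') else 0)
        (List.range (ct.toList.length / dm.length))) (List.range dm.length))
      = (List.range dm.length).map (fun j => (List.range (ct.toList.length / dm.length)).map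
          (fun i => decode_char (ct.toList.getD (i * dm.length + j) ' '))) := by
    apply List.map_congr_left; intro j _
    apply List.map_congr_left; intro i hi
    rw [if_pos (List.mem_range.mp hi)]
  simp only [hPclean]
  rw [matrix_mult_closed]
  have hhead : ((List.map (fun j => List.map (fun i => decode_char (ct.toList.getD (i * dm.length + j) ' '))
        (List.range (ct.toList.length / dm.length))) (List.range dm.length)).headD []).length
      = ct.toList.length / dm.length := by
    rw [headD_map_range _ _ _ hn]; simp
  rw [hhead]
  simp only [List.length_map, List.length_range]
  rw [headD_map_range _ _ _ hn]
  simp only [List.length_map, List.length_range]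
  apply congrArg String.mk
  apply PySem.List.foldl_congr_mem
  intro s i hi
  rw [foldl_index ([] : List Int)]
  apply PySem.List.foldl_congr_mem
  intro s' j hj
  have hi' := List.mem_range.mp hi
  have hj' := List.mem_range.mp hj
  have hblock : i * dm.length + dm.length <= ct.toList.length := by
    calc i * dm.length + dm.length = (i + 1) * dm.length := (Nat.succ_mul i dm.length).symm
      _ <= (ct.toList.length / dm.length) * dm.length := Nat.mul_le_mul_right _ hi'
      _ <= ct.toList.length := Nat.div_mul_le_self _ _
  rw [getD_map_range _ _ _ _ hj', getD_map_range _ _ _ _ hi']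
  have hfac : ∀ k : ℕ, ((List.map (fun j => List.map (fun i => decode_char (ct.toList.getD (i * dm.length + j) ' ')) (List.range (ct.toList.length / dm.length))) (List.range dm.length)).getD k []).getD i 0
      = (List.map decode_char (List.take dm.length (List.drop (i * dm.length) ct.toList))).getD k 0 := by
    intro k
    by_cases hk : k < dm.length
    · rw [getD_map_range _ _ _ _ hk, getD_map_range _ _ _ _ hi']
      have hidx : i * dm.length + k < ct.toList.length := by omega
      rw [List.getD_eq_getElem?_getD, List.getD_eq_getElem?_getD, List.getElem?_map,
          List.getElem?_take_of_lt hk, List.getElem?_drop,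
          List.getElem?_eq_getElem (by omega : i * dm.length + k < ct.toList.length)]
      rfl
    · rw [getD_map_range_ge _ _ _ _ (Nat.le_of_not_lt hk)]
      rw [List.getD_eq_getElem?_getD, List.getD_eq_getElem?_getD,
          List.getElem?_eq_none (l := []) (by simp),
          List.getElem?_eq_none (by simp only [List.length_map, List.length_take, List.length_drop]; omega)]
  rw [PySem.List.foldl_congr_mem (List.range (dm.headD []).length) _ _ 0
      (fun acc k _ => by rw [hfac k])]
  simp only [encode_val]
  split_ifs <;> rfl


theorem ports_eq (dm : List (List Int)) (ct : String) :
    hill_cipher_decrypt dm ct = hill_cipher_decrypt_alt dm ct := by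
  rcases dm with _ | ⟨r, tl⟩
  · simp [hill_cipher_decrypt, hill_cipher_decrypt_alt, matrix_mult]
  · exact ports_eq_pos _ _ (by simp)

-- ===== VERDICT (by name: the statement is the Claim_ definition above) =====
theorem hill_cipher_decrypt_spec : Claim_equal_hill_cipher_decrypt := by
  intro dm ct _ _
  exact ports_eq dm ct
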